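-- pv_equiv track=rewrite | github.com/SHUSMIT/DSA | Graphs/nearest1.py | nearest1
-- ===== SOURCE A (Python) =====
-- from collections import deque
--
-- def nearest1(mat):
--     m, n = len(mat), len(mat[0])
--     q = deque()
--     visited = [[0 for _ in range(n)] for _ in range(m)]
--     dist = [[0 for _ in range(n)] for _ in range(m)]  ## keep a distance matrix with all 0
--
--     direction = [(0, -1), (-1, 0), (0, 1), (1, 0)]
--
--     ## row,col,distance
--     for i in range(m):
--         for j in range(n):
--             if mat[i][j] == 1:
--                 q.append((i, j, 0))
--                 visited[i][j] = 1
--                 dist[i][j] = 0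
--
--     while q:
--         row,col,distance = q.popleft()
--         for dr, dc in direction:
--             r, c = row + dr, col + dc
--             if 0 <= r < m and 0 <= c < n:
--                 if not visited[r][c]:
--                     visited[r][c] = 1
--                     q.append((r,c,distance+1))
--                     dist[r][c] = distance + 1
--     return dist
-- ===== SOURCE B (Python) =====
-- def nearest1(mat):
--     m, n = len(mat), len(mat[0])
--     ones = [(i, j) for i in range(m) for j in range(n) if mat[i][j] == 1]
--     if not ones:
--         return [[0] * n for _ in range(m)]
--     return [[min(abs(i - r) + abs(j - c) for r, c in ones) for j in range(n)]
--             for i in range(m)]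
-- ===== Notes on version B (the rewrite author's own statement) =====
-- stated objective: simpler
-- what changed: Replaces the multi-source BFS (queue, visited matrix, distance bookkeeping) with a direct closed form: on an obstacle-free grid the BFS distance to the nearest 1 is the minimum Manhattan distance over all 1-cells, so B just collects the 1-cells once and takes that minimum per cell (all zeros when there is no 1); no queue, no visited state, no mutation.
import Mathlib
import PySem

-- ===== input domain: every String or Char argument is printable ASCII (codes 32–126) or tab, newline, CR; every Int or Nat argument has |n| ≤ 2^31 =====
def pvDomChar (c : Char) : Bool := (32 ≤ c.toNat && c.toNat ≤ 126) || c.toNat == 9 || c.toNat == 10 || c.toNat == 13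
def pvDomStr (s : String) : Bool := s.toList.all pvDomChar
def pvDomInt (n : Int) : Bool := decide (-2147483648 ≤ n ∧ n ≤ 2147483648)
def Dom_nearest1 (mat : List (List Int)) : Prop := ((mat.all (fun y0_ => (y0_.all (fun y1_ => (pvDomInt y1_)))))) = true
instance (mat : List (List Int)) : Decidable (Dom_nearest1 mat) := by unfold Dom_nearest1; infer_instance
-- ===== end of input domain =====

-- B replaces A's multi-source BFS (queue + visited + distance matrices) by a direct
-- closed form: on the full grid the BFS distance to the nearest 1 equals the minimum
-- Manhattan distance over all 1-cells (all zeros when there is none). Objective: simpler.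

-- ===== PORT A =====
-- 2-d helpers shared by both ports: v[r][c] as an Option (none = IndexError) and v[r][c] = x.
-- Every write below sits behind a '0 <= r < m and 0 <= c < n' guard (as in the Python), so .toNat is exact.
def pvGet2? {α : Type} (v : List (List α)) (r c : Int) : Option α :=
  match v[r.toNat]? with
  | some row => row[c.toNat]?
  | none => none

def pvSet2 {α : Type} (v : List (List α)) (r c : Int) (x : α) : List (List α) :=
  v.set r.toNat ((v.getD r.toNat []).set c.toNat x)

def pvDirs : List (Int × Int) := [(0, -1), (-1, 0), (0, 1), (1, 0)]

def pvCount {α : Type} (p : α → Bool) (v : List (List α)) : Nat :=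
  (v.map (fun row => row.countP p)).sum

def pvStepA (m n row col distance : Int)
    (st : List (List Int) × List (Int × Int × Int) × List (List Int)) (dir : Int × Int) :
    List (List Int) × List (Int × Int × Int) × List (List Int) :=
  let r := row + dir.1
  let c := col + dir.2
  if 0 ≤ r ∧ r < m ∧ 0 ≤ c ∧ c < n then
    if pvGet2? st.1 r c = some 0 then
      (pvSet2 st.1 r c 1, st.2.1 ++ [(r, c, distance + 1)], pvSet2 st.2.2 r c (distance + 1))
    else st
  else st

theorem row_flip {α : Type} (p : α → Bool) (b : α) (hpb : p b = false) :
    ∀ (row : List α) (cn : Nat) (a : α), row[cn]? = some a → p a = true →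
      (row.set cn b).countP p + 1 = row.countP p := by
  intro row
  induction row with
  | nil => intro cn a h; simp at h
  | cons x t ih =>
    intro cn a h hpa
    cases cn with
    | zero => simp at h; subst h; simp [hpa, hpb]
    | succ k =>
      simp at h
      have := ih k a h hpa
      simp [List.countP_cons]
      omega

theorem count_set_row {α : Type} (p : α → Bool) :
    ∀ (v : List (List α)) (rn : Nat) (row w : List α), v[rn]? = some row →
      pvCount p (v.set rn w) + row.countP p = pvCount p v + w.countP p := by
  intro v
  induction v with
  | nil => intro rn row w h; simp at h
  | cons x t ih =>
    intro rn row w h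
    cases rn with
    | zero => simp at h; subst h; simp [pvCount]; omega
    | succ k =>
      simp at h
      have := ih k row w h
      simp [pvCount] at *
      omega

theorem pvCount_flip {α : Type} (p : α → Bool) (v : List (List α)) (r c : Int) (a b : α)
    (h : pvGet2? v r c = some a) (hpa : p a = true) (hpb : p b = false) :
    pvCount p (pvSet2 v r c b) + 1 = pvCount p v := by
  unfold pvGet2? at h
  unfold pvSet2
  cases hrow : v[r.toNat]? with
  | none => simp [hrow] at h
  | some row =>
    rw [hrow] at h
    have hgd : v.getD r.toNat [] = row := by
      rw [List.getD_eq_getElem?_getD, hrow]; rfl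
    rw [hgd]
    have h1 := count_set_row p v r.toNat row (row.set c.toNat b) hrow
    have h2 := row_flip p b hpb row c.toNat a h hpa
    omega

theorem pvStepA_measure (m n row col distance : Int) :
    ∀ (ds : List (Int × Int)) (st : List (List Int) × List (Int × Int × Int) × List (List Int)),
      5 * pvCount (fun x => x == 0) (List.foldl (pvStepA m n row col distance) st ds).1
          + (List.foldl (pvStepA m n row col distance) st ds).2.1.length
        ≤ 5 * pvCount (fun x => x == 0) st.1 + st.2.1.length := by
  intro ds
  induction ds with
  | nil => intro st; simp
  | cons dir rest ih =>
    intro st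
    refine le_trans (ih _) ?_
    show 5 * pvCount (fun x => x == 0) (pvStepA m n row col distance st dir).1
          + (pvStepA m n row col distance st dir).2.1.length
        ≤ 5 * pvCount (fun x => x == 0) st.1 + st.2.1.length
    simp only [pvStepA]
    split_ifs with h1 h2
    · have := pvCount_flip (fun x => x == 0) st.1 (row + dir.1) (col + dir.2) 0 1 h2
        (by decide) (by decide)
      simp
      omega
    · simp
    · simp

def pvBfsA (m n : Int) (vis : List (List Int)) (q : List (Int × Int × Int))
    (dist : List (List Int)) : List (List Int) :=
  match q with
  | [] => dist
  | (row, col, distance) :: rest =>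
    let st := List.foldl (pvStepA m n row col distance) (vis, rest, dist) pvDirs
    pvBfsA m n st.1 st.2.1 st.2.2
termination_by 5 * pvCount (fun x => x == 0) vis + q.length
decreasing_by
  have h := pvStepA_measure m n row col distance pvDirs (vis, rest, dist)
  dsimp only at h
  simp only [List.length_cons]
  omega

def nearest1 (mat : List (List Int)) : List (List Int) :=
  let m : Int := PySem.List.len mat
  let n : Int := PySem.List.len (PySem.List.pyGetD mat 0 [])
  let visited : List (List Int) :=
    (PySem.List.pyRange 0 m 1).map (fun _ => (PySem.List.pyRange 0 n 1).map (fun _ => (0 : Int)))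
  let dist : List (List Int) :=
    (PySem.List.pyRange 0 m 1).map (fun _ => (PySem.List.pyRange 0 n 1).map (fun _ => (0 : Int)))
  let init :=
    List.foldl (fun st i =>
      List.foldl (fun st2 j =>
        if pvGet2? mat i j = some 1 then
          (st2.1 ++ [(i, j, (0 : Int))], pvSet2 st2.2.1 i j 1, pvSet2 st2.2.2 i j 0)
        else st2)
      st (PySem.List.pyRange 0 n 1))
      (([], visited, dist) : List (Int × Int × Int) × List (List Int) × List (List Int))
      (PySem.List.pyRange 0 m 1)
  pvBfsA m n init.2.1 init.1 init.2.2

-- ===== PORT B =====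
-- min(abs(i - r) + abs(j - c) for r, c in ones); the .getD 0 default is never taken,
-- the call sits under the 'ones ≠ []' guard.
def pvD (ones : List (Int × Int)) (i j : Int) : Int :=
  (PySem.List.min? (ones.map (fun p => |i - p.1| + |j - p.2|)) (fun x => x)).getD 0

def nearest1_alt (mat : List (List Int)) : List (List Int) :=
  let m : Int := PySem.List.len mat
  let n : Int := PySem.List.len (PySem.List.pyGetD mat 0 [])
  let ones : List (Int × Int) :=
    (PySem.List.pyRange 0 m 1).flatMap (fun i =>
      ((PySem.List.pyRange 0 n 1).filter (fun j => pvGet2? mat i j == some 1)).map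
        (fun j => (i, j)))
  if ones = [] then
    (PySem.List.pyRange 0 m 1).map (fun _ => PySem.List.pyRepeat [(0 : Int)] n)
  else
    (PySem.List.pyRange 0 m 1).map (fun i =>
      (PySem.List.pyRange 0 n 1).map (fun j => pvD ones i j))

-- ===== PRECONDITION & SPEC =====
-- Pre_ excludes exactly the inputs where Python A raises IndexError: the empty matrix
-- (mat[0]) and matrices with a row shorter than the first row (mat[i][j] for j < len(mat[0])).
def Pre_nearest1 (mat : List (List Int)) : Prop :=
  mat ≠ [] ∧ ∀ row ∈ mat, mat.headI.length ≤ row.length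
instance (mat : List (List Int)) : Decidable (Pre_nearest1 mat) := by
  unfold Pre_nearest1; infer_instance

def pvWitness_nearest1 : List (List Int) := [[1, 0], [0, 0]]

def Spec_nearest1 (mat : List (List Int)) (out : List (List Int)) : Prop := out = nearest1_alt mat
instance (mat : List (List Int)) (out : List (List Int)) : Decidable (Spec_nearest1 mat out) := by
  unfold Spec_nearest1; infer_instance

-- ===== CLAIM (what is proved, stated in full; the proofs are below) =====
def Claim_equal_nearest1 : Prop :=
  ∀ (mat : List (List Int)), Dom_nearest1 mat → Pre_nearest1 mat → Spec_nearest1 mat (nearest1 mat)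

-- ===== LEMMAS AND PROOFS =====

-- in-bounds cells and m×n shape
def pvInb (m n i j : Int) : Prop := 0 ≤ i ∧ i < m ∧ 0 ≤ j ∧ j < n

def pvShape {α : Type} (v : List (List α)) (m n : Nat) : Prop :=
  v.length = m ∧ ∀ row ∈ v, row.length = n

def pvMk (m n : Int) (g : Int → Int → Int) : List (List Int) :=
  (PySem.List.pyRange 0 m 1).map (fun i => (PySem.List.pyRange 0 n 1).map (fun j => g i j))

theorem pvMk_shape (m n : Int) (g : Int → Int → Int) : pvShape (pvMk m n g) m.toNat n.toNat := by
  constructor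
  · simp [pvMk, PySem.List.length_pyRange_one]
  · intro row hrow
    simp [pvMk] at hrow
    obtain ⟨i, _, h⟩ := hrow
    subst h
    simp [PySem.List.length_pyRange_one]

theorem pvGet2?_map_ranges {α : Type} (g : Int → Int → α) (m n i j : Int)
    (hi0 : 0 ≤ i) (him : i < m) (hj0 : 0 ≤ j) (hjn : j < n) :
    pvGet2? ((PySem.List.pyRange 0 m 1).map
        (fun i => (PySem.List.pyRange 0 n 1).map (fun j => g i j))) i j = some (g i j) := by
  have hrow : ∀ (x : Int) (k : Int), 0 ≤ k → k < x →
      (PySem.List.pyRange 0 x 1)[k.toNat]? = some k := by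
    intro x k hk0 hkx
    rw [PySem.List.pyRange_one]
    simp only [Int.sub_zero, List.getElem?_map]
    rw [List.getElem?_range (by omega : k.toNat < x.toNat)]
    simp [Int.toNat_of_nonneg hk0]
  unfold pvGet2?
  rw [List.getElem?_map, hrow m i hi0 him]
  simp only [Option.map_some]
  rw [List.getElem?_map, hrow n j hj0 hjn]
  rfl

theorem pvGet2?_pvMk (m n : Int) (g : Int → Int → Int) (i j : Int) (h : pvInb m n i j) :
    pvGet2? (pvMk m n g) i j = some (g i j) := by
  obtain ⟨h1, h2, h3, h4⟩ := h
  exact pvGet2?_map_ranges g m n i j h1 h2 h3 h4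

theorem pvMk_ext (m n : Int) (hm : 0 ≤ m) (hn : 0 ≤ n) (g : Int → Int → Int)
    (v : List (List Int)) (hs : pvShape v m.toNat n.toNat)
    (h : ∀ i j, pvInb m n i j → pvGet2? v i j = some (g i j)) : v = pvMk m n g := by
  have hsm := pvMk_shape m n g
  apply List.ext_getElem (by rw [hs.1, hsm.1])
  intro k h1 h2
  have hkm : k < m.toNat := by rw [hs.1] at h1; exact h1
  apply List.ext_getElem
  · rw [hs.2 _ (List.getElem_mem h1), hsm.2 _ (List.getElem_mem h2)]
  intro l h3 h4
  have hln : l < n.toNat := by rw [hs.2 _ (List.getElem_mem h1)] at h3; exact h3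
  have hib : pvInb m n (k : Int) (l : Int) := ⟨by omega, by omega, by omega, by omega⟩
  have hv := h _ _ hib
  unfold pvGet2? at hv
  simp only [Int.toNat_natCast] at hv
  rw [List.getElem?_eq_getElem h1] at hv
  simp only [] at hv
  rw [List.getElem?_eq_getElem h3] at hv
  have hv' : v[k][l] = g (k : Int) (l : Int) := by
    simpa using hv
  rw [hv']
  unfold pvMk
  simp only [List.getElem_map, PySem.List.getElem_pyRange_one, zero_add]

-- ----- pvD basics -----
theorem pvD_nil (i j : Int) : pvD [] i j = 0 := by
  rfl

theorem pvD_some (ones : List (Int × Int)) (hne : ones ≠ []) (i j : Int) :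
    PySem.List.min? (ones.map (fun p => |i - p.1| + |j - p.2|)) (fun x => x)
      = some (pvD ones i j) := by
  cases h : PySem.List.min? (ones.map (fun p => |i - p.1| + |j - p.2|)) (fun x => x) with
  | none =>
    rw [PySem.List.min?_eq_none_iff] at h
    simp [hne] at h
  | some v => simp [pvD, h]

theorem pvD_exists (ones : List (Int × Int)) (hne : ones ≠ []) (i j : Int) :
    ∃ p ∈ ones, pvD ones i j = |i - p.1| + |j - p.2| := by
  have h := pvD_some ones hne i j
  have hmem := PySem.List.min?_mem h
  rw [List.mem_map] at hmem
  obtain ⟨p, hp, hv⟩ := hmem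
  exact ⟨p, hp, hv.symm⟩

theorem pvD_le (ones : List (Int × Int)) (hne : ones ≠ []) (i j : Int)
    (p : Int × Int) (hp : p ∈ ones) : pvD ones i j ≤ |i - p.1| + |j - p.2| := by
  have h := pvD_some ones hne i j
  exact PySem.List.min?_isMin h _ (List.mem_map_of_mem hp)

theorem pvD_nonneg (ones : List (Int × Int)) (i j : Int) : 0 ≤ pvD ones i j := by
  by_cases hne : ones = []
  · rw [hne, pvD_nil]
  · obtain ⟨p, _, hp⟩ := pvD_exists ones hne i j
    rw [hp]
    positivity

theorem pvD_zero_of_mem (ones : List (Int × Int)) (i j : Int) (h : (i, j) ∈ ones) :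
    pvD ones i j = 0 := by
  have hne : ones ≠ [] := by rintro rfl; simp at h
  have h1 := pvD_le ones hne i j (i, j) h
  have h2 := pvD_nonneg ones i j
  simp at h1
  omega

theorem mem_of_pvD_zero (ones : List (Int × Int)) (hne : ones ≠ []) (i j : Int)
    (h : pvD ones i j = 0) : (i, j) ∈ ones := by
  obtain ⟨p, hp, hpe⟩ := pvD_exists ones hne i j
  have h2 : p = (i, j) := by
    obtain ⟨a, b⟩ := p
    rw [h] at hpe
    simp only [Int.abs_eq_natAbs] at hpe
    simp only [Prod.mk.injEq]
    omega
  rwa [h2] at hp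

theorem pvD_lipschitz (ones : List (Int × Int)) (hne : ones ≠ []) (i j r c : Int) :
    pvD ones r c ≤ pvD ones i j + |i - r| + |j - c| := by
  obtain ⟨p, hp, hpe⟩ := pvD_exists ones hne i j
  have h1 := pvD_le ones hne r c p hp
  simp only [Int.abs_eq_natAbs] at h1 hpe ⊢
  omega

-- on a full grid, any cell at distance d ≥ 1 has a 4-neighbour at distance d - 1
theorem pvD_step (m n : Int) (ones : List (Int × Int)) (hne : ones ≠ [])
    (hsub : ∀ p ∈ ones, pvInb m n p.1 p.2) (i j : Int) (hij : pvInb m n i j)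
    (hd : 1 ≤ pvD ones i j) :
    ∃ r c, pvInb m n r c ∧ (i - r).natAbs + (j - c).natAbs = 1 ∧
      pvD ones r c = pvD ones i j - 1 := by
  obtain ⟨p, hp, hpe⟩ := pvD_exists ones hne i j
  have hpin := hsub p hp
  obtain ⟨hp1, hp2, hp3, hp4⟩ := hpin
  obtain ⟨hi1, hi2, hi3, hi4⟩ := hij
  have gen : ∀ r c, pvInb m n r c → (i - r).natAbs + (j - c).natAbs = 1 →
      |r - p.1| + |c - p.2| = pvD ones i j - 1 → pvD ones r c = pvD ones i j - 1 := by
    intro r c _ hnb heq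
    have hub := pvD_le ones hne r c p hp
    have hlb := pvD_lipschitz ones hne r c i j
    simp only [Int.abs_eq_natAbs] at hub hlb heq ⊢
    omega
  simp only [Int.abs_eq_natAbs] at hpe
  rcases lt_trichotomy i p.1 with h1 | h1 | h1
  · refine ⟨i + 1, j, ⟨by omega, by omega, hi3, hi4⟩, by omega, ?_⟩
    refine gen _ _ ⟨by omega, by omega, hi3, hi4⟩ (by omega) ?_
    simp only [Int.abs_eq_natAbs]
    omega
  · rcases lt_trichotomy j p.2 with h2 | h2 | h2
    · refine ⟨i, j + 1, ⟨hi1, hi2, by omega, by omega⟩, by omega, ?_⟩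
      refine gen _ _ ⟨hi1, hi2, by omega, by omega⟩ (by omega) ?_
      simp only [Int.abs_eq_natAbs]
      omega
    · exfalso
      omega
    · refine ⟨i, j - 1, ⟨hi1, hi2, by omega, by omega⟩, by omega, ?_⟩
      refine gen _ _ ⟨hi1, hi2, by omega, by omega⟩ (by omega) ?_
      simp only [Int.abs_eq_natAbs]
      omega
  · refine ⟨i - 1, j, ⟨by omega, by omega, hi3, hi4⟩, by omega, ?_⟩
    refine gen _ _ ⟨by omega, by omega, hi3, hi4⟩ (by omega) ?_
    simp only [Int.abs_eq_natAbs]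
    omega

-- ----- get/set lemmas -----
theorem pvGet2?_eq_bind {α : Type} (v : List (List α)) (r c : Int) :
    pvGet2? v r c = v[r.toNat]?.bind (fun row => row[c.toNat]?) := by
  unfold pvGet2?
  cases v[r.toNat]? <;> rfl

theorem pvShape_set {α : Type} (v : List (List α)) (m n : Nat) (r c : Int) (x : α)
    (hs : pvShape v m n) : pvShape (pvSet2 v r c x) m n := by
  by_cases hr : r.toNat < v.length
  · constructor
    · simp [pvSet2, hs.1]
    · intro row hrow
      unfold pvSet2 at hrow
      rcases List.mem_or_eq_of_mem_set hrow with h | h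
      · exact hs.2 _ h
      · subst h
        rw [List.length_set, List.getD_eq_getElem v [] hr]
        exact hs.2 _ (List.getElem_mem hr)
  · unfold pvSet2
    rw [List.set_eq_of_length_le (by omega)]
    exact hs

theorem pvGet2?_set_self {α : Type} (v : List (List α)) (m n : Nat) (r c : Int) (x : α)
    (hs : pvShape v m n) (hr : r.toNat < m) (hc : c.toNat < n) :
    pvGet2? (pvSet2 v r c x) r c = some x := by
  have hr' : r.toNat < v.length := by rw [hs.1]; exact hr
  have hlen : c.toNat < (v.getD r.toNat []).length := by
    rw [List.getD_eq_getElem v [] hr']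
    rw [hs.2 _ (List.getElem_mem hr')]
    exact hc
  rw [pvGet2?_eq_bind]
  unfold pvSet2
  rw [List.getElem?_set_self (by simpa using hr')]
  simp only [Option.bind_some]
  rw [List.getElem?_set_self (by simpa using hlen)]

theorem pvGet2?_set_ne {α : Type} (v : List (List α)) (r c i j : Int) (x : α)
    (h : i.toNat ≠ r.toNat ∨ j.toNat ≠ c.toNat) :
    pvGet2? (pvSet2 v r c x) i j = pvGet2? v i j := by
  rw [pvGet2?_eq_bind, pvGet2?_eq_bind]
  unfold pvSet2
  rcases h with h | h
  · rw [List.getElem?_set_ne (by omega)]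
  · by_cases hir : i.toNat = r.toNat
    · rw [hir]
      by_cases hr : r.toNat < v.length
      · rw [List.getElem?_set_self (by simpa using hr)]
        rw [List.getD_eq_getElem v [] hr]
        rw [List.getElem?_eq_getElem hr]
        simp only [Option.bind_some]
        rw [List.getElem?_set_ne (by omega)]
      · rw [List.set_eq_of_length_le (by omega)]
    · rw [List.getElem?_set_ne (by omega)]

-- ===== the BFS invariant =====
structure BInv (m n : Int) (ones : List (Int × Int)) (vis : List (List Int))
    (q : List (Int × Int × Int)) (dist : List (List Int)) : Prop where
  shapeV : pvShape vis m.toNat n.toNat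
  shapeD : pvShape dist m.toNat n.toNat
  vis01 : ∀ i j, pvInb m n i j → pvGet2? vis i j = some 0 ∨ pvGet2? vis i j = some 1
  qmem : ∀ e ∈ q, pvInb m n e.1 e.2.1 ∧ pvGet2? vis e.1 e.2.1 = some 1 ∧
      e.2.2 = pvD ones e.1 e.2.1
  qwin : List.Pairwise (fun a b : Int × Int × Int => a.2.2 ≤ b.2.2 ∧ b.2.2 ≤ a.2.2 + 1) q
  dvis : ∀ i j, pvInb m n i j → pvGet2? vis i j = some 1 →
      pvGet2? dist i j = some (pvD ones i j)
  dunv : ∀ i j, pvInb m n i j → pvGet2? vis i j = some 0 → pvGet2? dist i j = some 0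
  srcV : ∀ i j, pvInb m n i j → (i, j) ∈ ones → pvGet2? vis i j = some 1
  closure : ∀ i j, pvInb m n i j → pvGet2? vis i j = some 1 →
      (∃ d, (i, j, d) ∈ q) ∨
      (∀ r c, pvInb m n r c → (i - r).natAbs + (j - c).natAbs = 1 →
        pvGet2? vis r c = some 1)
  frontier : ∀ h rest, q = h :: rest → ∀ i j, pvInb m n i j →
      pvGet2? vis i j = some 0 → h.2.2 + 1 ≤ pvD ones i j

theorem pvCellNe {i j r c : Int} (h0i : 0 ≤ i) (h0j : 0 ≤ j) (h0r : 0 ≤ r) (h0c : 0 ≤ c)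
    (h : ¬(i = r ∧ j = c)) : i.toNat ≠ r.toNat ∨ j.toNat ≠ c.toNat := by
  omega

-- invariant maintained while folding one popped cell's direction list
structure MInv (m n : Int) (ones : List (Int × Int)) (row col d : Int)
    (rest : List (Int × Int × Int))
    (st : List (List Int) × List (Int × Int × Int) × List (List Int)) : Prop where
  shapeV : pvShape st.1 m.toNat n.toNat
  shapeD : pvShape st.2.2 m.toNat n.toNat
  vis01 : ∀ i j, pvInb m n i j → pvGet2? st.1 i j = some 0 ∨ pvGet2? st.1 i j = some 1
  qmem : ∀ e ∈ st.2.1, pvInb m n e.1 e.2.1 ∧ pvGet2? st.1 e.1 e.2.1 = some 1 ∧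
      e.2.2 = pvD ones e.1 e.2.1
  qwin : List.Pairwise (fun a b : Int × Int × Int => a.2.2 ≤ b.2.2 ∧ b.2.2 ≤ a.2.2 + 1) st.2.1
  qrange : ∀ e ∈ st.2.1, d ≤ e.2.2 ∧ e.2.2 ≤ d + 1
  dvis : ∀ i j, pvInb m n i j → pvGet2? st.1 i j = some 1 →
      pvGet2? st.2.2 i j = some (pvD ones i j)
  dunv : ∀ i j, pvInb m n i j → pvGet2? st.1 i j = some 0 → pvGet2? st.2.2 i j = some 0
  srcV : ∀ i j, pvInb m n i j → (i, j) ∈ ones → pvGet2? st.1 i j = some 1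
  closure' : ∀ i j, pvInb m n i j → pvGet2? st.1 i j = some 1 → ¬(i = row ∧ j = col) →
      (∃ dd, (i, j, dd) ∈ st.2.1) ∨
      (∀ r c, pvInb m n r c → (i - r).natAbs + (j - c).natAbs = 1 →
        pvGet2? st.1 r c = some 1)
  funv : ∀ i j, pvInb m n i j → pvGet2? st.1 i j = some 0 → d + 1 ≤ pvD ones i j
  sub : ∀ e ∈ rest, e ∈ st.2.1

theorem step_pres (m n : Int) (ones : List (Int × Int)) (row col d : Int)
    (rest : List (Int × Int × Int)) (hd : d = pvD ones row col)
    (dir : Int × Int) (hdir : dir.1.natAbs + dir.2.natAbs = 1)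
    (st : List (List Int) × List (Int × Int × Int) × List (List Int))
    (M : MInv m n ones row col d rest st) :
    MInv m n ones row col d rest (pvStepA m n row col d st dir) ∧
    (∀ i j, pvInb m n i j → pvGet2? st.1 i j = some 1 →
      pvGet2? (pvStepA m n row col d st dir).1 i j = some 1) ∧
    (pvInb m n (row + dir.1) (col + dir.2) →
      pvGet2? (pvStepA m n row col d st dir).1 (row + dir.1) (col + dir.2) = some 1) := by
  simp only [pvStepA]
  split_ifs with hg hv
  · -- in bounds and unvisited: mark, enqueue with d+1, write dist
    set r := row + dir.1 with hrdef
    set c := col + dir.2 with hcdef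
    have hin : pvInb m n r c := hg
    obtain ⟨hr0, hrm, hc0, hcn⟩ := hin
    have hpd : pvD ones r c = d + 1 := by
      by_cases hones : ones = []
      · exfalso
        have h1 := M.funv r c hg hv
        rw [hones, pvD_nil] at h1
        rw [hones, pvD_nil] at hd
        omega
      · have hub := pvD_lipschitz ones hones row col r c
        have hlb := M.funv r c hg hv
        simp only [Int.abs_eq_natAbs] at hub
        have habs : (row - r).natAbs + (col - c).natAbs = 1 := by
          rw [hrdef, hcdef]; omega
        omega
    have hgss : pvGet2? (pvSet2 st.1 r c 1) r c = some (1 : Int) :=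
      pvGet2?_set_self st.1 m.toNat n.toNat r c 1 M.shapeV (by omega) (by omega)
    have hgssD : pvGet2? (pvSet2 st.2.2 r c (d + 1)) r c = some (d + 1) :=
      pvGet2?_set_self st.2.2 m.toNat n.toNat r c (d + 1) M.shapeD (by omega) (by omega)
    have hne' : ∀ i j : Int, pvInb m n i j → ¬(i = r ∧ j = c) →
        pvGet2? (pvSet2 st.1 r c 1) i j = pvGet2? st.1 i j := by
      intro i j hij hnij
      exact pvGet2?_set_ne st.1 r c i j 1 (pvCellNe hij.1 hij.2.2.1 hr0 hc0 hnij)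
    have hneD : ∀ i j : Int, pvInb m n i j → ¬(i = r ∧ j = c) →
        pvGet2? (pvSet2 st.2.2 r c (d + 1)) i j = pvGet2? st.2.2 i j := by
      intro i j hij hnij
      exact pvGet2?_set_ne st.2.2 r c i j (d + 1) (pvCellNe hij.1 hij.2.2.1 hr0 hc0 hnij)
    have hmono : ∀ i j, pvInb m n i j → pvGet2? st.1 i j = some 1 →
        pvGet2? (pvSet2 st.1 r c 1) i j = some 1 := by
      intro i j hij hv1
      by_cases hc1 : i = r ∧ j = c
      · obtain ⟨rfl, rfl⟩ := hc1
        exact hgss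
      · rw [hne' i j hij hc1]; exact hv1
    refine ⟨?_, hmono, fun _ => hgss⟩
    constructor
    · exact pvShape_set st.1 m.toNat n.toNat r c 1 M.shapeV
    · exact pvShape_set st.2.2 m.toNat n.toNat r c (d + 1) M.shapeD
    · intro i j hij
      by_cases hc1 : i = r ∧ j = c
      · obtain ⟨rfl, rfl⟩ := hc1
        right; exact hgss
      · rw [hne' i j hij hc1]; exact M.vis01 i j hij
    · intro e he
      rcases List.mem_append.mp he with h | h
      · obtain ⟨he1, he2, he3⟩ := M.qmem e h
        refine ⟨he1, ?_, he3⟩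
        exact hmono _ _ he1 he2
      · simp at h
        subst h
        exact ⟨hg, hgss, hpd.symm⟩
    · rw [List.pairwise_append]
      refine ⟨M.qwin, List.pairwise_singleton _ _, ?_⟩
      intro a ha b hb
      simp at hb
      subst hb
      have := M.qrange a ha
      constructor <;> simp <;> omega
    · intro e he
      rcases List.mem_append.mp he with h | h
      · exact M.qrange e h
      · simp at h; subst h; constructor <;> simp
    · intro i j hij hv1
      by_cases hc1 : i = r ∧ j = c
      · obtain ⟨rfl, rfl⟩ := hc1
        rw [hgssD, hpd]
      · rw [hne' i j hij hc1] at hv1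
        rw [hneD i j hij hc1]
        exact M.dvis i j hij hv1
    · intro i j hij hv0
      by_cases hc1 : i = r ∧ j = c
      · obtain ⟨rfl, rfl⟩ := hc1
        rw [hgss] at hv0
        exact absurd hv0 (by simp)
      · rw [hne' i j hij hc1] at hv0
        rw [hneD i j hij hc1]
        exact M.dunv i j hij hv0
    · intro i j hij hmem
      exact hmono i j hij (M.srcV i j hij hmem)
    · intro i j hij hv1 hnrc
      by_cases hc1 : i = r ∧ j = c
      · obtain ⟨rfl, rfl⟩ := hc1
        left
        exact ⟨d + 1, by simp⟩
      · rw [hne' i j hij hc1] at hv1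
        rcases M.closure' i j hij hv1 hnrc with ⟨dd, hdd⟩ | hall
        · exact Or.inl ⟨dd, List.mem_append_left _ hdd⟩
        · right
          intro a b hab hnab
          exact hmono a b hab (hall a b hab hnab)
    · intro i j hij hv0
      by_cases hc1 : i = r ∧ j = c
      · obtain ⟨rfl, rfl⟩ := hc1
        rw [hgss] at hv0
        exact absurd hv0 (by simp)
      · rw [hne' i j hij hc1] at hv0
        exact M.funv i j hij hv0
    · intro e he
      exact List.mem_append_left _ (M.sub e he)
  · -- in bounds but already visited
    refine ⟨M, fun i j _ hv1 => hv1, fun _ => ?_⟩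
    rcases M.vis01 _ _ hg with h | h
    · exact absurd h hv
    · exact h
  · -- out of bounds: the guard is exactly pvInb
    exact ⟨M, fun i j _ hv1 => hv1, fun hin => absurd hin hg⟩

theorem fold_pres (m n : Int) (ones : List (Int × Int)) (row col d : Int)
    (rest : List (Int × Int × Int)) (hd : d = pvD ones row col) :
    ∀ (ds : List (Int × Int)), (∀ dir ∈ ds, dir.1.natAbs + dir.2.natAbs = 1) →
    ∀ st, MInv m n ones row col d rest st →
      MInv m n ones row col d rest (List.foldl (pvStepA m n row col d) st ds) ∧
      (∀ i j, pvInb m n i j → pvGet2? st.1 i j = some 1 →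
        pvGet2? (List.foldl (pvStepA m n row col d) st ds).1 i j = some 1) ∧
      (∀ dir ∈ ds, pvInb m n (row + dir.1) (col + dir.2) →
        pvGet2? (List.foldl (pvStepA m n row col d) st ds).1
          (row + dir.1) (col + dir.2) = some 1) := by
  intro ds
  induction ds with
  | nil => exact fun _ st M => ⟨M, fun _ _ _ h => h, by simp⟩
  | cons dir ds ih =>
    intro hds st M
    obtain ⟨M1, mono1, tgt1⟩ := step_pres m n ones row col d rest hd dir
      (hds dir (by simp)) st M
    obtain ⟨M2, mono2, tgt2⟩ := ih (fun e he => hds e (by simp [he])) _ M1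
    simp only [List.foldl_cons]
    refine ⟨M2, ?_, ?_⟩
    · intro i j hij hv1
      exact mono2 i j hij (mono1 i j hij hv1)
    · intro e he
      rcases List.mem_cons.mp he with h | h
      · subst h
        intro hin
        exact mono2 _ _ hin (tgt1 hin)
      · exact tgt2 e h

theorem inv_step (m n : Int) (ones : List (Int × Int))
    (hone : ∀ p ∈ ones, pvInb m n p.1 p.2)
    (vis dist : List (List Int)) (row col d : Int) (rest : List (Int × Int × Int))
    (H : BInv m n ones vis ((row, col, d) :: rest) dist) :
    BInv m n ones
      (List.foldl (pvStepA m n row col d) (vis, rest, dist) pvDirs).1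
      (List.foldl (pvStepA m n row col d) (vis, rest, dist) pvDirs).2.1
      (List.foldl (pvStepA m n row col d) (vis, rest, dist) pvDirs).2.2 := by
  obtain ⟨hrc_in0, hrc_vis0, hd0⟩ := H.qmem (row, col, d) (by simp)
  have hrc_in : pvInb m n row col := hrc_in0
  have hrc_vis : pvGet2? vis row col = some 1 := hrc_vis0
  have hd : d = pvD ones row col := hd0
  have hpair := List.pairwise_cons.mp H.qwin
  have M0 : MInv m n ones row col d rest (vis, rest, dist) := by
    refine ⟨H.shapeV, H.shapeD, H.vis01, ?_, hpair.2, hpair.1, H.dvis, H.dunv, H.srcV,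
      ?_, ?_, fun e he => he⟩
    · exact fun e he => H.qmem e (by simp [he])
    · intro i j hij hv1 hne
      rcases H.closure i j hij hv1 with ⟨dd, hdd⟩ | hall
      · rcases List.mem_cons.mp hdd with h | h
        · exfalso
          apply hne
          simp at h
          exact ⟨h.1, h.2.1⟩
        · exact Or.inl ⟨dd, h⟩
      · exact Or.inr hall
    · exact fun i j hij hv0 => H.frontier (row, col, d) rest rfl i j hij hv0
  obtain ⟨M, mono, tgts⟩ := fold_pres m n ones row col d rest hd pvDirs
    (by decide) (vis, rest, dist) M0
  have hclosure : ∀ i j, pvInb m n i j →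
      pvGet2? (List.foldl (pvStepA m n row col d) (vis, rest, dist) pvDirs).1 i j = some 1 →
      (∃ dd, (i, j, dd) ∈ (List.foldl (pvStepA m n row col d) (vis, rest, dist) pvDirs).2.1) ∨
      (∀ r c, pvInb m n r c → (i - r).natAbs + (j - c).natAbs = 1 →
        pvGet2? (List.foldl (pvStepA m n row col d) (vis, rest, dist) pvDirs).1 r c
          = some 1) := by
    intro i j hij hv1
    by_cases hc1 : i = row ∧ j = col
    · obtain ⟨rfl, rfl⟩ := hc1
      right
      intro r c hrc hnb
      have hcases : (r = i + 0 ∧ c = j + (-1)) ∨ (r = i + (-1) ∧ c = j + 0) ∨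
          (r = i + 0 ∧ c = j + 1) ∨ (r = i + 1 ∧ c = j + 0) := by omega
      rcases hcases with ⟨h1, h2⟩ | ⟨h1, h2⟩ | ⟨h1, h2⟩ | ⟨h1, h2⟩ <;> subst h1 <;> subst h2
      · exact tgts (0, -1) (by simp [pvDirs]) hrc
      · exact tgts (-1, 0) (by simp [pvDirs]) hrc
      · exact tgts (0, 1) (by simp [pvDirs]) hrc
      · exact tgts (1, 0) (by simp [pvDirs]) hrc
    · exact M.closure' i j hij hv1 hc1
  refine ⟨M.shapeV, M.shapeD, M.vis01, M.qmem, M.qwin, M.dvis, M.dunv, M.srcV, hclosure, ?_⟩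
  intro h' rest' hq i j hij hv0
  have hh' : h' ∈ (List.foldl (pvStepA m n row col d) (vis, rest, dist) pvDirs).2.1 := by
    rw [hq]; simp
  have hr1 := M.qrange h' hh'
  have hfu := M.funv i j hij hv0
  by_cases hcase : h'.2.2 ≤ d
  · omega
  · have hones : ones ≠ [] := by
      intro he
      rw [he, pvD_nil] at hfu
      rw [he, pvD_nil] at hd
      omega
    by_contra hlt
    rw [not_le] at hlt
    have hDij : pvD ones i j = d + 1 := by omega
    have hd1 : 1 ≤ pvD ones i j := by
      have := pvD_nonneg ones row col
      omega
    obtain ⟨a, b, hab_in, hab_nb, hab_d⟩ := pvD_step m n ones hones hone i j hij hd1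
    have hvisab : pvGet2? (List.foldl (pvStepA m n row col d) (vis, rest, dist) pvDirs).1 a b
        = some 1 := by
      rcases M.vis01 a b hab_in with h0 | h1
      · exfalso
        have := M.funv a b hab_in h0
        omega
      · exact h1
    rcases hclosure a b hab_in hvisab with ⟨dd, hdd⟩ | hall
    · have hq3 := M.qmem _ hdd
      have hdd_val : dd = d := by
        have hq4 : dd = pvD ones a b := hq3.2.2
        omega
      rw [hq] at hdd
      rcases List.mem_cons.mp hdd with he | he
      · have : dd = h'.2.2 := by rw [← he]
        omega
      · have hw0 := (List.pairwise_cons.mp (hq ▸ M.qwin)).1 _ he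
        have hw : h'.2.2 ≤ dd ∧ dd ≤ h'.2.2 + 1 := hw0
        omega
    · have hsy : (a - i).natAbs + (b - j).natAbs = 1 := by omega
      have := hall i j hij hsy
      rw [hv0] at this
      simp at this

theorem inv_final (m n : Int) (hm : 0 ≤ m) (hn : 0 ≤ n) (ones : List (Int × Int))
    (hone : ∀ p ∈ ones, pvInb m n p.1 p.2)
    (vis dist : List (List Int)) (H : BInv m n ones vis [] dist) :
    dist = pvMk m n (pvD ones) := by
  have hvisited : ∀ i j, pvInb m n i j → ones ≠ [] → pvGet2? vis i j = some 1 := by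
    have hall : ∀ (k : Nat) (i j : Int), pvInb m n i j → ones ≠ [] →
        pvD ones i j ≤ (k : Int) → pvGet2? vis i j = some 1 := by
      intro k
      induction k with
      | zero =>
        intro i j hij hones h0
        have h1 := pvD_nonneg ones i j
        exact H.srcV i j hij (mem_of_pvD_zero ones hones i j (by omega))
      | succ k ih =>
        intro i j hij hones hk
        by_cases hle : pvD ones i j ≤ (k : Int)
        · exact ih i j hij hones hle
        · have hd1 : 1 ≤ pvD ones i j := by
            have := pvD_nonneg ones i j
            omega
          obtain ⟨a, b, hab_in, hab_nb, hab_d⟩ := pvD_step m n ones hones hone i j hij hd1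
          have hvab : pvGet2? vis a b = some 1 := by
            apply ih a b hab_in hones
            push_cast at hk ⊢
            omega
          rcases H.closure a b hab_in hvab with ⟨dd, hdd⟩ | hnb
          · simp at hdd
          · apply hnb i j hij
            omega
    intro i j hij hones
    exact hall (pvD ones i j).toNat i j hij hones
      (by rw [Int.toNat_of_nonneg (pvD_nonneg ones i j)])
  apply pvMk_ext m n hm hn (pvD ones) dist H.shapeD
  intro i j hij
  by_cases hones : ones = []
  · rcases H.vis01 i j hij with h0 | h1
    · rw [H.dunv i j hij h0, hones, pvD_nil]
    · exact H.dvis i j hij h1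
  · exact H.dvis i j hij (hvisited i j hij hones)

theorem bfs_correct (m n : Int) (hm : 0 ≤ m) (hn : 0 ≤ n) (ones : List (Int × Int))
    (hone : ∀ p ∈ ones, pvInb m n p.1 p.2) :
    ∀ (vis : List (List Int)) (q : List (Int × Int × Int)) (dist : List (List Int)),
      BInv m n ones vis q dist → pvBfsA m n vis q dist = pvMk m n (pvD ones) := by
  intro vis q dist
  induction vis, q, dist using pvBfsA.induct m n with
  | case1 vis dist =>
    intro H
    rw [pvBfsA]
    exact inv_final m n hm hn ones hone vis dist H
  | case2 vis dist row col distance rest st ih =>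
    intro H
    rw [pvBfsA]
    exact ih (inv_step m n ones hone vis dist row col distance rest H)

theorem pyRange0_cast (x : Int) :
    PySem.List.pyRange 0 x 1 = (List.range x.toNat).map (fun k => Int.ofNat k) := by
  rw [PySem.List.pyRange_one]; simp

theorem getD_set_self {α : Type} (v : List α) (i : Nat) (w w' : α) (h : i < v.length) :
    (v.set i w).getD i w' = w := by
  rw [List.getD_eq_getElem?_getD, List.getElem?_set_self h]; rfl

theorem fill_row {α : Type} (cond : Int → Prop) [DecidablePred cond] (x b : α) :
    ∀ (N M' : Nat),
      List.foldl (fun (row : List α) (j : Int) => if cond j then row.set j.toNat x else row)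
          (List.replicate (N + M') b) ((List.range N).map (fun k => Int.ofNat k))
        = (List.range N).map (fun k => if cond (Int.ofNat k) then x else b)
            ++ List.replicate M' b := by
  intro N
  induction N with
  | zero => intro M'; simp
  | succ N ih =>
    intro M'
    rw [List.range_succ, List.map_append, List.foldl_append,
        show N + 1 + M' = N + (M' + 1) by omega, ih (M' + 1)]
    simp only [List.map_cons, List.map_nil, List.foldl_cons, List.foldl_nil]
    rw [List.replicate_succ]
    by_cases hc : cond (Int.ofNat N)
    · rw [if_pos hc]
      rw [show ((Int.ofNat N).toNat) = N by simp]
      simp [List.set_append, List.range_succ]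
      exact fun h => absurd hc h
    · rw [if_neg hc]
      simp only [List.range_succ, List.map_append, List.map_cons, List.map_nil,
        List.append_assoc, List.singleton_append]
      rw [if_neg hc]

theorem inner_localize {α : Type} (cond : Int → Prop) [DecidablePred cond] (x : α) (i : Int) :
    ∀ (js : List Int) (v : List (List α)), i.toNat < v.length →
      List.foldl (fun v j => if cond j then pvSet2 v i j x else v) v js
        = v.set i.toNat
            (List.foldl
              (fun (row : List α) (j : Int) => if cond j then row.set j.toNat x else row)
              (v.getD i.toNat []) js) := by
  intro js
  induction js with
  | nil =>
    intro v hv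
    rw [List.foldl_nil, List.foldl_nil, List.getD_eq_getElem v [] hv, List.set_getElem_self]
  | cons j rest ih =>
    intro v hv
    simp only [List.foldl_cons]
    by_cases hc : cond j
    · rw [if_pos hc, if_pos hc]
      have hlen : i.toNat < (pvSet2 v i j x).length := by simpa [pvSet2] using hv
      rw [ih _ hlen]
      show (pvSet2 v i j x).set i.toNat _ = _
      have hgd : (pvSet2 v i j x).getD i.toNat [] = (v.getD i.toNat []).set j.toNat x := by
        unfold pvSet2
        exact getD_set_self v i.toNat _ _ hv
      rw [hgd]
      show (v.set i.toNat _).set i.toNat _ = _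
      rw [List.set_set]
    · rw [if_neg hc, if_neg hc, ih _ hv]

theorem fill_mat {α : Type} (cond2 : Int → Int → Prop) [∀ a b, Decidable (cond2 a b)]
    (js : List Int) (h0 : List α) (x : α) :
    ∀ (N M' : Nat),
      List.foldl (fun (v : List (List α)) (i : Int) =>
          List.foldl (fun v j => if cond2 i j then pvSet2 v i j x else v) v js)
        (List.replicate (N + M') h0) ((List.range N).map (fun k => Int.ofNat k))
      = (List.range N).map (fun k =>
          List.foldl
            (fun (row : List α) (j : Int) =>
              if cond2 (Int.ofNat k) j then row.set j.toNat x else row)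
            h0 js)
          ++ List.replicate M' h0 := by
  intro N
  induction N with
  | zero => intro M'; simp
  | succ N ih =>
    intro M'
    rw [List.range_succ, List.map_append, List.foldl_append,
        show N + 1 + M' = N + (M' + 1) by omega, ih (M' + 1)]
    simp only [List.map_cons, List.map_nil, List.foldl_cons, List.foldl_nil]
    rw [List.replicate_succ]
    have hlen : (Int.ofNat N).toNat <
        ((List.range N).map (fun k =>
          List.foldl
            (fun (row : List α) (j : Int) =>
              if cond2 (Int.ofNat k) j then row.set j.toNat x else row)
            h0 js) ++ h0 :: List.replicate M' h0).length := by
      simp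
    rw [inner_localize (cond2 (Int.ofNat N)) x (Int.ofNat N) js _ hlen]
    rw [show ((Int.ofNat N).toNat) = N by simp]
    have hpre : ((List.range N).map (fun k =>
          List.foldl
            (fun (row : List α) (j : Int) =>
              if cond2 (Int.ofNat k) j then row.set j.toNat x else row)
            h0 js)).length = N := by simp
    rw [List.getD_eq_getElem?_getD]
    rw [show (((List.range N).map (fun k =>
          List.foldl
            (fun (row : List α) (j : Int) =>
              if cond2 (Int.ofNat k) j then row.set j.toNat x else row)
            h0 js) ++ h0 :: List.replicate M' h0)[N]?) = some h0 by
      rw [List.getElem?_append_right (by omega), hpre]; simp]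
    simp only [Option.getD_some]
    simp [List.set_append, List.range_succ]

theorem initA_split (mat : List (List Int)) (m n : Int) (vis0 dist0 : List (List Int)) :
    List.foldl (fun st i =>
      List.foldl (fun st2 j =>
        if pvGet2? mat i j = some 1 then
          (st2.1 ++ [(i, j, (0 : Int))], pvSet2 st2.2.1 i j 1, pvSet2 st2.2.2 i j 0)
        else st2)
      st (PySem.List.pyRange 0 n 1))
      (([], vis0, dist0) : List (Int × Int × Int) × List (List Int) × List (List Int))
      (PySem.List.pyRange 0 m 1)
    = ((PySem.List.pyRange 0 m 1).flatMap (fun i =>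
          ((PySem.List.pyRange 0 n 1).filter
            (fun j => decide (pvGet2? mat i j = some 1))).map (fun j => (i, j, (0 : Int)))),
       List.foldl (fun v i =>
         List.foldl (fun v j => if pvGet2? mat i j = some 1 then pvSet2 v i j 1 else v) v
           (PySem.List.pyRange 0 n 1)) vis0 (PySem.List.pyRange 0 m 1),
       List.foldl (fun dd i =>
         List.foldl (fun dd j => if pvGet2? mat i j = some 1 then pvSet2 dd i j 0 else dd) dd
           (PySem.List.pyRange 0 n 1)) dist0 (PySem.List.pyRange 0 m 1)) := by
  have h1 : ∀ (i : Int) (st : List (Int × Int × Int) × List (List Int) × List (List Int)),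
      List.foldl (fun st2 j =>
        if pvGet2? mat i j = some 1 then
          (st2.1 ++ [(i, j, (0 : Int))], pvSet2 st2.2.1 i j 1, pvSet2 st2.2.2 i j 0)
        else st2) st (PySem.List.pyRange 0 n 1)
      = (List.foldl (fun q j => if pvGet2? mat i j = some 1 then q ++ [(i, j, (0 : Int))] else q)
           st.1 (PySem.List.pyRange 0 n 1),
         List.foldl (fun v j => if pvGet2? mat i j = some 1 then pvSet2 v i j 1 else v)
           st.2.1 (PySem.List.pyRange 0 n 1),
         List.foldl (fun dd j => if pvGet2? mat i j = some 1 then pvSet2 dd i j 0 else dd)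
           st.2.2 (PySem.List.pyRange 0 n 1)) := by
    intro i st
    obtain ⟨a, b, c⟩ := st
    have hstep : (fun (st2 : List (Int × Int × Int) × List (List Int) × List (List Int))
        (j : Int) =>
        if pvGet2? mat i j = some 1 then
          (st2.1 ++ [(i, j, (0 : Int))], pvSet2 st2.2.1 i j 1, pvSet2 st2.2.2 i j 0)
        else st2)
      = (fun st2 j =>
          (if pvGet2? mat i j = some 1 then st2.1 ++ [(i, j, (0 : Int))] else st2.1,
           if pvGet2? mat i j = some 1 then pvSet2 st2.2.1 i j 1 else st2.2.1,
           if pvGet2? mat i j = some 1 then pvSet2 st2.2.2 i j 0 else st2.2.2)) := by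
      funext st2 j; split <;> rfl
    rw [hstep]
    rw [PySem.List.foldl_prod_mk
        (f := fun q j => if pvGet2? mat i j = some 1 then q ++ [(i, j, (0 : Int))] else q)
        (g := fun t j =>
          (if pvGet2? mat i j = some 1 then pvSet2 t.1 i j 1 else t.1,
           if pvGet2? mat i j = some 1 then pvSet2 t.2 i j 0 else t.2))]
    rw [PySem.List.foldl_prod_mk
        (f := fun v j => if pvGet2? mat i j = some 1 then pvSet2 v i j 1 else v)
        (g := fun dd j => if pvGet2? mat i j = some 1 then pvSet2 dd i j 0 else dd)]
  simp only [h1]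
  rw [PySem.List.foldl_prod_mk
      (f := fun q i => List.foldl
        (fun q j => if pvGet2? mat i j = some 1 then q ++ [(i, j, (0 : Int))] else q) q
        (PySem.List.pyRange 0 n 1))
      (g := fun t i =>
        (List.foldl (fun v j => if pvGet2? mat i j = some 1 then pvSet2 v i j 1 else v) t.1
          (PySem.List.pyRange 0 n 1),
         List.foldl (fun dd j => if pvGet2? mat i j = some 1 then pvSet2 dd i j 0 else dd) t.2
          (PySem.List.pyRange 0 n 1)))]
  rw [PySem.List.foldl_prod_mk
      (f := fun v i => List.foldl
        (fun v j => if pvGet2? mat i j = some 1 then pvSet2 v i j 1 else v) v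
        (PySem.List.pyRange 0 n 1))
      (g := fun dd i => List.foldl
        (fun dd j => if pvGet2? mat i j = some 1 then pvSet2 dd i j 0 else dd) dd
        (PySem.List.pyRange 0 n 1))]
  congr 1
  simp only [PySem.List.foldl_append_ite]
  rw [PySem.List.foldl_append_eq_flatMap]
  simp

theorem set2_zeroM (m n i j : Int) (hi0 : 0 ≤ i) (him : i < m) (hj0 : 0 ≤ j) (hjn : j < n) :
    pvSet2 ((PySem.List.pyRange 0 m 1).map
        (fun _ => (PySem.List.pyRange 0 n 1).map (fun _ => (0 : Int)))) i j 0
      = (PySem.List.pyRange 0 m 1).map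
          (fun _ => (PySem.List.pyRange 0 n 1).map (fun _ => (0 : Int))) := by
  unfold pvSet2
  have hlen : i.toNat < ((PySem.List.pyRange 0 m 1).map
      (fun _ => (PySem.List.pyRange 0 n 1).map (fun _ => (0 : Int)))).length := by
    simp [PySem.List.length_pyRange_one]
    omega
  rw [List.getD_eq_getElem _ _ hlen, List.getElem_map]
  have hset : ((PySem.List.pyRange 0 n 1).map (fun _ => (0 : Int))).set j.toNat 0
      = (PySem.List.pyRange 0 n 1).map (fun _ => (0 : Int)) := by
    simp [List.map_const', List.set_replicate_self]
  rw [hset]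
  have hb : ((PySem.List.pyRange 0 m 1).map
        (fun _ => (PySem.List.pyRange 0 n 1).map (fun _ => (0 : Int))))[i.toNat]'hlen
      = (PySem.List.pyRange 0 n 1).map (fun _ => (0 : Int)) := by simp
  have hs := List.set_getElem_self hlen
  rw [hb] at hs
  exact hs

theorem D0_inner_zero (mat : List (List Int)) (m n i : Int) (hi0 : 0 ≤ i) (him : i < m) :
    ∀ (l : List Int), (∀ j ∈ l, 0 ≤ j ∧ j < n) →
      List.foldl (fun dd j => if pvGet2? mat i j = some 1 then pvSet2 dd i j 0 else dd)
        ((PySem.List.pyRange 0 m 1).map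
          (fun _ => (PySem.List.pyRange 0 n 1).map (fun _ => (0 : Int)))) l
      = (PySem.List.pyRange 0 m 1).map
          (fun _ => (PySem.List.pyRange 0 n 1).map (fun _ => (0 : Int))) := by
  intro l
  induction l with
  | nil => intro _; rfl
  | cons j rest ih =>
    intro hmem
    simp only [List.foldl_cons]
    have hj := hmem j (by simp)
    by_cases hc : pvGet2? mat i j = some 1
    · rw [if_pos hc, set2_zeroM m n i j hi0 him hj.1 hj.2]
      exact ih (fun x hx => hmem x (by simp [hx]))
    · rw [if_neg hc]
      exact ih (fun x hx => hmem x (by simp [hx]))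

theorem D0_zero (mat : List (List Int)) (m n : Int) :
    List.foldl (fun dd i =>
        List.foldl (fun dd j => if pvGet2? mat i j = some 1 then pvSet2 dd i j 0 else dd) dd
          (PySem.List.pyRange 0 n 1))
      ((PySem.List.pyRange 0 m 1).map
        (fun _ => (PySem.List.pyRange 0 n 1).map (fun _ => (0 : Int))))
      (PySem.List.pyRange 0 m 1)
    = (PySem.List.pyRange 0 m 1).map
        (fun _ => (PySem.List.pyRange 0 n 1).map (fun _ => (0 : Int))) := by
  have haux : ∀ (L : List Int), (∀ i ∈ L, 0 ≤ i ∧ i < m) →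
      List.foldl (fun dd i =>
        List.foldl (fun dd j => if pvGet2? mat i j = some 1 then pvSet2 dd i j 0 else dd) dd
          (PySem.List.pyRange 0 n 1))
      ((PySem.List.pyRange 0 m 1).map
        (fun _ => (PySem.List.pyRange 0 n 1).map (fun _ => (0 : Int)))) L
      = (PySem.List.pyRange 0 m 1).map
          (fun _ => (PySem.List.pyRange 0 n 1).map (fun _ => (0 : Int))) := by
    intro L
    induction L with
    | nil => intro _; rfl
    | cons i rest ih =>
      intro hmem
      have hi := hmem i (by simp)
      simp only [List.foldl_cons]
      rw [D0_inner_zero mat m n i hi.1 hi.2 _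
        (fun j hj => (PySem.List.mem_pyRange_one.mp hj).imp (fun h => h) (fun h => by omega))]
      exact ih (fun x hx => hmem x (by simp [hx]))
  exact haux _ (fun i hi => (PySem.List.mem_pyRange_one.mp hi).imp (fun h => h) (fun h => by omega))

theorem distB_zero (m n : Int) :
    (PySem.List.pyRange 0 m 1).map (fun _ => PySem.List.pyRepeat [(0 : Int)] n)
      = (PySem.List.pyRange 0 m 1).map
          (fun _ => (PySem.List.pyRange 0 n 1).map (fun _ => (0 : Int))) := by
  simp [PySem.List.pyRepeat_singleton, List.map_const', PySem.List.length_pyRange_one]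

theorem vis0_eq (mat : List (List Int)) (m n : Int) :
    List.foldl (fun v i =>
        List.foldl (fun v j => if pvGet2? mat i j = some 1 then pvSet2 v i j 1 else v) v
          (PySem.List.pyRange 0 n 1))
      ((PySem.List.pyRange 0 m 1).map
        (fun _ => (PySem.List.pyRange 0 n 1).map (fun _ => (0 : Int))))
      (PySem.List.pyRange 0 m 1)
    = pvMk m n (fun i j => if pvGet2? mat i j = some 1 then 1 else 0) := by
  have hz : (PySem.List.pyRange 0 m 1).map
        (fun _ => (PySem.List.pyRange 0 n 1).map (fun _ => (0 : Int)))
      = List.replicate (m.toNat + 0) (List.replicate n.toNat (0 : Int)) := by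
    simp [List.map_const', PySem.List.length_pyRange_one]
  rw [hz]
  conv_lhs => rw [pyRange0_cast m]
  rw [fill_mat (fun a b => pvGet2? mat a b = some 1) (PySem.List.pyRange 0 n 1)
      (List.replicate n.toNat (0 : Int)) 1 m.toNat 0]
  simp only [List.replicate_zero, List.append_nil]
  unfold pvMk
  conv_rhs => rw [pyRange0_cast m]
  rw [List.map_map]
  apply List.map_congr_left
  intro k _
  conv_lhs => rw [pyRange0_cast n,
    show (List.replicate n.toNat (0 : Int)) = List.replicate (n.toNat + 0) (0 : Int) by simp]
  rw [fill_row (fun b => pvGet2? mat (Int.ofNat k) b = some 1) 1 0 n.toNat 0]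
  simp only [List.replicate_zero, List.append_nil, Function.comp_apply]
  conv_rhs => rw [pyRange0_cast n]
  rw [List.map_map]
  rfl

theorem pairwise_zero_map (l : List (Int × Int)) :
    List.Pairwise (fun a b : Int × Int × Int => a.2.2 ≤ b.2.2 ∧ b.2.2 ≤ a.2.2 + 1)
      (l.map (fun p => (p.1, p.2, (0 : Int)))) := by
  induction l with
  | nil => simp
  | cons p t ih =>
    simp only [List.map_cons]
    refine List.Pairwise.cons ?_ ih
    intro b hb
    rw [List.mem_map] at hb
    obtain ⟨q, _, rfl⟩ := hb
    constructor <;> simp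

theorem inv_init (mat : List (List Int)) (m n : Int) (ones : List (Int × Int))
    (hmem : ∀ p : Int × Int, p ∈ ones ↔ pvInb m n p.1 p.2 ∧ pvGet2? mat p.1 p.2 = some 1) :
    BInv m n ones
      (pvMk m n (fun i j => if pvGet2? mat i j = some 1 then 1 else 0))
      (ones.map (fun p => (p.1, p.2, (0 : Int))))
      (pvMk m n (fun _ _ => (0 : Int))) := by
  refine ⟨pvMk_shape m n _, pvMk_shape m n _, ?_, ?_, pairwise_zero_map ones, ?_, ?_, ?_, ?_, ?_⟩
  · intro i j hij
    rw [pvGet2?_pvMk m n _ i j hij]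
    by_cases h : pvGet2? mat i j = some 1 <;> simp [h]
  · intro e he
    rw [List.mem_map] at he
    obtain ⟨p, hp, rfl⟩ := he
    obtain ⟨h1, h2⟩ := (hmem p).1 hp
    refine ⟨h1, ?_, ?_⟩
    · rw [pvGet2?_pvMk m n _ _ _ h1]
      simp [h2]
    · have hmem2 : (p.1, p.2) ∈ ones := by rwa [Prod.mk.eta]
      simp [pvD_zero_of_mem ones p.1 p.2 hmem2]
  · intro i j hij hv1
    rw [pvGet2?_pvMk m n _ i j hij] at hv1
    rw [pvGet2?_pvMk m n _ i j hij]
    by_cases h : pvGet2? mat i j = some 1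
    · have hmem2 : (i, j) ∈ ones := (hmem (i, j)).2 ⟨hij, h⟩
      rw [pvD_zero_of_mem ones i j hmem2]
    · simp [h] at hv1
  · intro i j hij _
    rw [pvGet2?_pvMk m n _ i j hij]
  · intro i j hij hmem2
    have h := ((hmem (i, j)).1 hmem2).2
    rw [pvGet2?_pvMk m n _ i j hij]
    simp [h]
  · intro i j hij hv1
    rw [pvGet2?_pvMk m n _ i j hij] at hv1
    by_cases h : pvGet2? mat i j = some 1
    · left
      refine ⟨0, List.mem_map.mpr ⟨(i, j), (hmem (i, j)).2 ⟨hij, h⟩, rfl⟩⟩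
    · simp [h] at hv1
  · intro h rest hqe i j hij hv0
    have hones : ones ≠ [] := by
      intro h0
      rw [h0] at hqe
      simp at hqe
    have hd0 : h.2.2 = 0 := by
      have hh : h ∈ ones.map (fun p => (p.1, p.2, (0 : Int))) := by rw [hqe]; simp
      rw [List.mem_map] at hh
      obtain ⟨q, _, rfl⟩ := hh
      rfl
    rw [pvGet2?_pvMk m n _ i j hij] at hv0
    have hnmem : (i, j) ∉ ones := by
      intro hmem2
      have h2 := ((hmem (i, j)).1 hmem2).2
      simp [h2] at hv0
    have hnz : pvD ones i j ≠ 0 := by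
      intro h0
      exact hnmem (mem_of_pvD_zero ones hones i j h0)
    have := pvD_nonneg ones i j
    omega

theorem nearest1_eq (mat : List (List Int)) : nearest1 mat = nearest1_alt mat := by
  simp only [nearest1, nearest1_alt]
  rw [initA_split, D0_zero, vis0_eq]
  set m := PySem.List.len mat with hmdef
  set n := PySem.List.len (PySem.List.pyGetD mat 0 []) with hndef
  set ones := (PySem.List.pyRange 0 m 1).flatMap (fun i =>
      ((PySem.List.pyRange 0 n 1).filter (fun j => pvGet2? mat i j == some 1)).map
        (fun j => (i, j))) with hOnes
  have hm : 0 ≤ m := by rw [hmdef]; exact Int.natCast_nonneg _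
  have hn : 0 ≤ n := by rw [hndef]; exact Int.natCast_nonneg _
  have hmem : ∀ p : Int × Int, p ∈ ones ↔ pvInb m n p.1 p.2 ∧ pvGet2? mat p.1 p.2 = some 1 := by
    intro p
    rw [hOnes]
    simp only [List.mem_flatMap, List.mem_map, List.mem_filter, PySem.List.mem_pyRange_one,
      beq_iff_eq]
    constructor
    · rintro ⟨i, hi, j, ⟨hj, hc⟩, rfl⟩
      exact ⟨⟨hi.1, hi.2, hj.1, hj.2⟩, hc⟩
    · rintro ⟨⟨h1, h2, h3, h4⟩, hc⟩
      exact ⟨p.1, ⟨h1, h2⟩, p.2, ⟨⟨h3, h4⟩, hc⟩, Prod.mk.eta⟩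
  have hone : ∀ p ∈ ones, pvInb m n p.1 p.2 := fun p hp => ((hmem p).1 hp).1
  have hq0 : (PySem.List.pyRange 0 m 1).flatMap (fun i =>
        ((PySem.List.pyRange 0 n 1).filter
          (fun j => decide (pvGet2? mat i j = some 1))).map (fun j => (i, j, (0 : Int))))
      = ones.map (fun p => (p.1, p.2, (0 : Int))) := by
    rw [hOnes, List.map_flatMap]
    apply List.flatMap_congr
    intro i _
    rw [List.map_map]
    have hfil : (PySem.List.pyRange 0 n 1).filter (fun j => pvGet2? mat i j == some 1)
        = (PySem.List.pyRange 0 n 1).filter (fun j => decide (pvGet2? mat i j = some 1)) := by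
      apply List.filter_congr
      intro j _
      by_cases h : pvGet2? mat i j = some 1 <;> simp [h]
    rw [hfil]
    rfl
  rw [hq0]
  by_cases hones : ones = []
  · rw [hones]
    simp only [List.map_nil]
    rw [pvBfsA]
    simp only [if_true]
    exact (distB_zero m n).symm
  · rw [if_neg hones]
    exact bfs_correct m n hm hn ones hone _ _ _ (inv_init mat m n ones hmem)

-- ===== VERDICT (by name: the statement is the Claim_ definition above) =====
theorem nearest1_spec : Claim_equal_nearest1 := by
  intro mat _ _
  exact nearest1_eq mat
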